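-- pv_equiv track=rewrite | github.com/billkondo/MAC0385 | suffix_array/build_suffix_array_linear.py | _counting_sort_T2
-- ===== SOURCE A (Python) =====
-- from typing import Dict, List
--
-- def _compare_triples(text: List[int], i: int, j: int) -> int:
--     for k in range(0, 3):
--         if text[i + k] < text[j + k]:
--             return -1
--
--         if text[i + k] > text[j + k]:
--             return 1
--
--     return -1 if i > j else 0 if i == j else 1
--
-- def _max_letter_in_text(text: List[int]) -> int:
--     MAX_LETTER = 0
--     for c in text:
--         MAX_LETTER = max(MAX_LETTER, c)
--
--     return MAX_LETTER
--
-- def _counting_sort_T2(text: List[int], initial_suffix_array_T2: List[int]) -> List[int]: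
--     def _sort_initial_suffix_array_T2_by_first_letter(initial_suffix_array_T2: List[int]) -> List[int]:
--         MAX_LETTER = _max_letter_in_text(text)
--         buckets = [[] for _ in range(0, MAX_LETTER + 1)]
--
--         for i in range(0, len(initial_suffix_array_T2)):
--             buckets[text[3 * initial_suffix_array_T2[i] - 1]].append(initial_suffix_array_T2[i] - 1)
--
--         suffix_array = []
--         for bucket in buckets:
--             suffix_array.extend(bucket)
--
--         return suffix_array
--
--     def _add_last_triple(suffix_array: List[int], text: List[int]) -> List[int]:
--         if len(text) % 3 != 2:
--             # Last triple is not in T2 or was already inserted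
--             return suffix_array
--
--         last_triple = len(text) - 3
--         last_triple_index_in_T2 = (len(text) - 2) // 3 - 1
--         position_to_insert = 0
--         while (
--             position_to_insert < len(suffix_array)
--             and _compare_triples(text, suffix_array[position_to_insert], last_triple) < 0
--         ):
--             position_to_insert += 1
--
--         if position_to_insert == 0:
--             return [last_triple_index_in_T2] + suffix_array
--
--         if position_to_insert == len(suffix_array):
--             return suffix_array + [last_triple_index_in_T2]
--
--         return suffix_array[:position_to_insert] + [last_triple_index_in_T2] + suffix_array[position_to_insert:]
--
--     suffix_array_T2 = _sort_initial_suffix_array_T2_by_first_letter(initial_suffix_array_T2)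
--
--     return _add_last_triple(suffix_array_T2, text)
-- ===== SOURCE B (Python) =====
-- def _counting_sort_T2(text, initial_suffix_array_T2):
--     # stable comparison sort by the first letter of each triple, then one
--     # slice-splice insertion of the last triple at the first non-smaller entry
--     sa = sorted((i - 1 for i in initial_suffix_array_T2), key=lambda v: text[3 * v + 2])
--     if len(text) % 3 != 2:
--         return sa
--     last = len(text) - 3
--
--     def key(s):
--         return (text[s], text[s + 1], text[s + 2], -s)
--
--     klast = key(last)
--     pos = next((p for p, s in enumerate(sa) if key(s) >= klast), len(sa))
--     return sa[:pos] + [(len(text) - 2) // 3 - 1] + sa[pos:]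
-- ===== Notes on version B (the rewrite author's own statement) =====
-- stated objective: simpler
-- what changed: The MAX_LETTER-sized bucket table (allocate, distribute, concatenate) is replaced by one stable sorted() call keyed on the triple's first letter, and the three-branch while-loop insertion of the last triple is replaced by a find-first-position plus a single slice splice using a lexicographic tuple key instead of the hand-written three-way comparator.
-- outside the precondition, e.g. on _counting_sort_T2([-1, 9, 3, 9, 9, -1, 9, 9], [1, 2]): A returns [0, 1, 1], B returns [1, 1, 0]
import Mathlib
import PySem

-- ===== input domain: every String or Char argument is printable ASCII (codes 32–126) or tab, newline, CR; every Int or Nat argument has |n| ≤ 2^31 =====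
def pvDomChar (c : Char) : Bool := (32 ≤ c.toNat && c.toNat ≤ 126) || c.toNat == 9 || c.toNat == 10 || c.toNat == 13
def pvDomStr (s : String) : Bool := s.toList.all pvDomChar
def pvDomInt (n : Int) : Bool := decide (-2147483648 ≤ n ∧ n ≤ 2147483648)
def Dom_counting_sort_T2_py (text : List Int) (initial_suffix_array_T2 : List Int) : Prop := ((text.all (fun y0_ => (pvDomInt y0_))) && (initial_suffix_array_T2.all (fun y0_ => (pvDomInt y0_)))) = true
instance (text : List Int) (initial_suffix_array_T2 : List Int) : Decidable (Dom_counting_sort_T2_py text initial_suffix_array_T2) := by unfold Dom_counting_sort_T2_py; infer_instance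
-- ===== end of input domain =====

-- B replaces A's counting-sort bucket table by one stable comparison sort keyed on the
-- triple's first letter, and the three-branch while-loop insertion by a find-first-position
-- splice; equivalence is proved on the natural domain (non-negative letters, in-range 1-based
-- T2 positions) stated in Pre_.


-- ===== PORT A =====

-- the 'for k in range(0, 3)' body of _compare_triples, with its early returns (none = fell through)
def pvCmpK (text : List Int) (i j : Int) : List Int → Option Int
  | [] => none
  | k :: ks =>
    if PySem.List.pyGetD text (i + k) 0 < PySem.List.pyGetD text (j + k) 0 then some (-1)
    else if PySem.List.pyGetD text (i + k) 0 > PySem.List.pyGetD text (j + k) 0 then some 1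
    else pvCmpK text i j ks

def pvCompareTriples (text : List Int) (i j : Int) : Int :=
  match pvCmpK text i j (PySem.List.pyRange 0 3) with
  | some r => r
  | none => if i > j then -1 else if i = j then 0 else 1

def pvMaxLetterInText (text : List Int) : Int :=
  text.foldl (fun m c => max m c) 0

-- Python 'buckets[c].append(x)': exact list-index semantics (a negative index wraps by +len;
-- out of range would raise IndexError — that branch leaves buckets unchanged, junk outside Pre_)
def pvBucketAppend (buckets : List (List Int)) (c : Int) (x : Int) : List (List Int) :=
  let c' := if c < 0 then c + buckets.length else c
  if 0 ≤ c' ∧ c' < (buckets.length : Int) then buckets.modify c'.toNat (fun b => b ++ [x])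
  else buckets

def pvSortByFirstLetter (text : List Int) (initial : List Int) : List Int :=
  let MAX := pvMaxLetterInText text
  let buckets0 : List (List Int) := List.replicate (MAX + 1).toNat []
  let buckets := (PySem.List.pyRange 0 (initial.length : Int)).foldl
    (fun bs i =>
      pvBucketAppend bs (PySem.List.pyGetD text (3 * (PySem.List.pyGetD initial i 0) - 1) 0)
        (PySem.List.pyGetD initial i 0 - 1)) buckets0
  buckets.foldl (fun sa b => sa ++ b) []

-- the 'while' loop of _add_last_triple: number of leading entries comparing < 0 against last_triple
def pvFindPos (text : List Int) (last : Int) : List Int → Nat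
  | [] => 0
  | s :: rest => if pvCompareTriples text s last < 0 then pvFindPos text last rest + 1 else 0

def pvAddLastTriple (sa : List Int) (text : List Int) : List Int :=
  if PySem.Int.mod (text.length : Int) 3 ≠ 2 then sa
  else
    let last : Int := (text.length : Int) - 3
    let idx : Int := PySem.Int.floordiv ((text.length : Int) - 2) 3 - 1
    let pos := pvFindPos text last sa
    if pos = 0 then idx :: sa
    else if pos = sa.length then sa ++ [idx]
    else PySem.List.slice sa none (some (pos : Int)) ++ [idx] ++ PySem.List.slice sa (some (pos : Int)) none

def counting_sort_T2_py (text : List Int) (initial_suffix_array_T2 : List Int) : List Int :=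
  pvAddLastTriple (pvSortByFirstLetter text initial_suffix_array_T2) text

-- ===== PORT B =====

-- B's key(s) = (text[s], text[s+1], text[s+2], -s)
def pvKey3 (text : List Int) (s : Int) : Int × Int × Int × Int :=
  (PySem.List.pyGetD text s 0, PySem.List.pyGetD text (s + 1) 0,
   PySem.List.pyGetD text (s + 2) 0, -s)

-- Python tuple '>=' on int 4-tuples, written out lexicographically (Lean's pair order is pointwise)
def pvKeyGe (a b : Int × Int × Int × Int) : Bool :=
  if a.1 ≠ b.1 then a.1 > b.1
  else if a.2.1 ≠ b.2.1 then a.2.1 > b.2.1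
  else if a.2.2.1 ≠ b.2.2.1 then a.2.2.1 > b.2.2.1
  else a.2.2.2 ≥ b.2.2.2

-- 'sa[:pos] + [..] + sa[pos:]' with the position from next(... enumerate ...) (= findIdx?);
-- take/drop is exact here since 0 ≤ pos ≤ len sa
def pvSpliceLast (text : List Int) (sa : List Int) : List Int :=
  if PySem.Int.mod (text.length : Int) 3 ≠ 2 then sa
  else
    let klast := pvKey3 text ((text.length : Int) - 3)
    let pos := (sa.findIdx? (fun s => pvKeyGe (pvKey3 text s) klast)).getD sa.length
    sa.take pos ++ (PySem.Int.floordiv ((text.length : Int) - 2) 3 - 1) :: sa.drop pos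

def counting_sort_T2_py_alt (text : List Int) (initial_suffix_array_T2 : List Int) : List Int :=
  pvSpliceLast text
    (PySem.List.sorted (initial_suffix_array_T2.map (fun i => i - 1))
      (fun v => PySem.List.pyGetD text (3 * v + 2) 0))

-- ===== PRECONDITION & SPEC =====
-- Pre_ is the natural domain of the function: every entry v keys a first letter text[3*v-1]
-- inside Python's index range of text, and that letter is non-negative.  Outside it A either
-- raises IndexError or (for a negative first letter) returns an order produced by Python's
-- negative-index wraparound of the bucket table, which B does not reproduce (see claim cites).
def Pre_counting_sort_T2_py (text : List Int) (initial_suffix_array_T2 : List Int) : Prop :=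
  ∀ v ∈ initial_suffix_array_T2, -(text.length : Int) ≤ 3 * v - 1 ∧ 3 * v - 1 < (text.length : Int) ∧
    0 ≤ PySem.List.pyGetD text (3 * v - 1) 0
instance (text : List Int) (initial_suffix_array_T2 : List Int) : Decidable (Pre_counting_sort_T2_py text initial_suffix_array_T2) := by unfold Pre_counting_sort_T2_py; infer_instance

def pvWitness_counting_sort_T2_py : List Int × List Int := ([1, 2, 1, 3, 2], [1])

def Spec_counting_sort_T2_py (text : List Int) (initial_suffix_array_T2 : List Int) (out : List Int) : Prop := out = counting_sort_T2_py_alt text initial_suffix_array_T2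
instance (text : List Int) (initial_suffix_array_T2 : List Int) (out : List Int) : Decidable (Spec_counting_sort_T2_py text initial_suffix_array_T2 out) := by unfold Spec_counting_sort_T2_py; infer_instance

-- ===== CLAIM (what is proved, stated in full; the proofs are below) =====
def Claim_equal_counting_sort_T2_py : Prop := ∀ (text : List Int) (initial_suffix_array_T2 : List Int), Dom_counting_sort_T2_py text initial_suffix_array_T2 → Pre_counting_sort_T2_py text initial_suffix_array_T2 → Spec_counting_sort_T2_py text initial_suffix_array_T2 (counting_sort_T2_py text initial_suffix_array_T2)

-- ===== LEMMAS AND PROOFS =====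

theorem pv_insertBy_mid (k : Int → Int) (x : Int) (lo hi : List Int)
    (hlo : ∀ y ∈ lo, k y ≤ k x) (hhi : ∀ y ∈ hi, k x < k y) :
    PySem.List.insertBy (fun a b => decide (k a < k b)) x (lo ++ hi) = lo ++ x :: hi := by
  induction lo with
  | nil =>
    cases hi with
    | nil => simp [PySem.List.insertBy]
    | cons y ys =>
      simp only [List.nil_append, PySem.List.insertBy]
      rw [if_pos (by simpa using hhi y (by simp))]
  | cons z lo' ih =>
    simp only [List.cons_append, PySem.List.insertBy]
    rw [if_neg (by simpa using not_lt.mpr (hlo z (by simp)))]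
    rw [ih (fun y hy => hlo y (by simp [hy]))]

theorem pv_sorted_eq_buckets_aux (k : Int → Int) (bs : List Int) (hb : bs.Pairwise (· < ·)) :
    ∀ (xs p : List Int), (∀ x ∈ xs, k x ∈ bs) →
      xs.foldl (fun acc x => PySem.List.insertBy (fun a b => decide (k a < k b)) x acc)
        (bs.flatMap (fun b => p.filter (fun v => decide (k v = b))))
      = bs.flatMap (fun b => (p ++ xs).filter (fun v => decide (k v = b))) := by
  intro xs
  induction xs with
  | nil => intro p _; simp
  | cons x xs ih =>
    intro p hcov
    have hx : k x ∈ bs := hcov x (by simp)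
    obtain ⟨b1, b2, hsplit⟩ := List.append_of_mem hx
    have hpw := hsplit ▸ hb
    rw [List.pairwise_append] at hpw
    obtain ⟨hpw1, hpw2, hcross⟩ := hpw
    rw [List.pairwise_cons] at hpw2
    -- insert step: acc over p splits as lo ++ hi at bucket (k x)
    have hstep :
        PySem.List.insertBy (fun a b => decide (k a < k b)) x
          (bs.flatMap (fun b => p.filter (fun v => decide (k v = b))))
        = bs.flatMap (fun b => (p ++ [x]).filter (fun v => decide (k v = b))) := by
      rw [hsplit, List.flatMap_append, List.flatMap_cons, ← List.append_assoc]
      rw [pv_insertBy_mid k x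
        (b1.flatMap (fun b => p.filter (fun v => decide (k v = b))) ++
          p.filter (fun v => decide (k v = k x)))
        (b2.flatMap (fun b => p.filter (fun v => decide (k v = b))))
        (by
          intro y hy
          rcases List.mem_append.mp hy with hy | hy
          · obtain ⟨b, hbmem, hyf⟩ := List.mem_flatMap.mp hy
            have : k y = b := by simpa using (List.mem_filter.mp hyf).2
            exact le_of_lt (this ▸ hcross b hbmem (k x) (by simp))
          · have : k y = k x := by simpa using (List.mem_filter.mp hy).2
            exact le_of_eq this)
        (by
          intro y hy
          obtain ⟨b, hbmem, hyf⟩ := List.mem_flatMap.mp hy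
          have : k y = b := by simpa using (List.mem_filter.mp hyf).2
          exact this ▸ hpw2.1 b hbmem)]
      -- now redistribute: bucket (k x) gains x, others unchanged
      have hfxne : ∀ b : Int, b ≠ k x →
          (p ++ [x]).filter (fun v => decide (k v = b)) = p.filter (fun v => decide (k v = b)) := by
        intro b hne
        rw [List.filter_append]
        simp [Ne.symm hne]
      have hfx : (p ++ [x]).filter (fun v => decide (k v = k x)) =
          p.filter (fun v => decide (k v = k x)) ++ [x] := by
        rw [List.filter_append]; simp
      rw [List.flatMap_append, List.flatMap_cons, hfx]
      have h1 : b1.flatMap (fun b => (p ++ [x]).filter (fun v => decide (k v = b)))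
          = b1.flatMap (fun b => p.filter (fun v => decide (k v = b))) := by
        refine List.flatMap_congr ?_
        intro b hbmem
        exact hfxne b (ne_of_lt (hcross b hbmem (k x) (by simp)))
      have h2 : b2.flatMap (fun b => (p ++ [x]).filter (fun v => decide (k v = b)))
          = b2.flatMap (fun b => p.filter (fun v => decide (k v = b))) := by
        refine List.flatMap_congr ?_
        intro b hbmem
        exact hfxne b (ne_of_gt (hpw2.1 b hbmem))
      rw [h1, h2]
      simp
    rw [List.foldl_cons, hstep, ih (p ++ [x]) (fun y hy => hcov y (by simp [hy]))]
    simp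

theorem pv_sorted_eq_buckets (k : Int → Int) (bs : List Int) (hb : bs.Pairwise (· < ·))
    (xs : List Int) (h : ∀ x ∈ xs, k x ∈ bs) :
    PySem.List.sorted xs k = bs.flatMap (fun b => xs.filter (fun v => decide (k v = b))) := by
  rw [PySem.List.sorted_eq_foldl_insertBy]
  have h0 : (bs.flatMap (fun b => ([] : List Int).filter (fun v => decide (k v = b)))) = [] := by
    simp
  rw [← h0, pv_sorted_eq_buckets_aux k bs hb xs [] h]
  simp

theorem pv_getD_range_map (B : List (List Int)) :
    (List.range B.length).map (fun b => B.getD b []) = B := by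
  apply List.ext_getElem (by simp)
  intro i h1 h2
  simp [List.getD_eq_getElem?_getD, List.getElem?_eq_getElem h2]

theorem pv_bucket_fold (k : Int → Int) :
    ∀ (ks : List Int) (B : List (List Int)), (∀ v ∈ ks, 0 ≤ k v ∧ k v < (B.length : Int)) →
      ks.foldl (fun bs v => pvBucketAppend bs (k v) v) B
      = (List.range B.length).map (fun b => B.getD b [] ++ ks.filter (fun v => decide (k v = (b : Int)))) := by
  intro ks
  induction ks with
  | nil =>
    intro B _
    simp only [List.foldl_nil, List.filter_nil, List.append_nil]
    exact (pv_getD_range_map B).symm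
  | cons v ks ih =>
    intro B h
    obtain ⟨hv0, hvlt⟩ := h v (by simp)
    rw [List.foldl_cons]
    have hBA : pvBucketAppend B (k v) v = B.modify (k v).toNat (fun b => b ++ [v]) := by
      unfold pvBucketAppend
      rw [if_neg (not_lt.mpr hv0)]
      rw [if_pos ⟨hv0, hvlt⟩]
    rw [hBA]
    have hlen : (B.modify (k v).toNat (fun b => b ++ [v])).length = B.length := List.length_modify ..
    rw [ih _ (by rw [hlen]; exact fun y hy => h y (by simp [hy]))]
    rw [hlen]
    apply List.map_congr_left
    intro b hbmem
    have hblt : b < B.length := List.mem_range.mp hbmem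
    by_cases hbe : (k v).toNat = b
    · have hkb : k v = (b : Int) := by omega
      have : (B.modify (k v).toNat (fun l => l ++ [v])).getD b [] = B.getD b [] ++ [v] := by
        rw [List.getD_eq_getElem?_getD, List.getElem?_modify, List.getD_eq_getElem?_getD,
          List.getElem?_eq_getElem hblt]
        simp [hbe]
      rw [this, List.filter_cons, if_pos (by simp [hkb])]
      simp
    · have hkb : k v ≠ (b : Int) := by omega
      have : (B.modify (k v).toNat (fun l => l ++ [v])).getD b [] = B.getD b [] := by
        rw [List.getD_eq_getElem?_getD, List.getElem?_modify, List.getD_eq_getElem?_getD,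
          List.getElem?_eq_getElem hblt]
        simp [hbe]
      rw [this, List.filter_cons, if_neg (by simp [hkb])]

theorem pv_pyGetD_mem (xs : List Int) (i : Int) (d : Int)
    (h1 : -(xs.length : Int) ≤ i) (h2 : i < (xs.length : Int)) :
    PySem.List.pyGetD xs i d ∈ xs := by
  simp only [PySem.List.pyGetD, PySem.List.pyGet?, PySem.List.pyIdx?]
  by_cases h0 : 0 ≤ i
  · rw [if_pos h0, if_pos h2]
    have hk : i.toNat < xs.length := by omega
    simp [List.getElem?_eq_getElem hk]
  · rw [if_neg h0, if_pos h1]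
    have hk : xs.length - (-i).toNat < xs.length := by omega
    simp [List.getElem?_eq_getElem hk]

theorem pv_sort_phase (text initial : List Int)
    (hpre : Pre_counting_sort_T2_py text initial) :
    pvSortByFirstLetter text initial
    = PySem.List.sorted (initial.map (fun i => i - 1))
        (fun v => PySem.List.pyGetD text (3 * v + 2) 0) := by
  have hidx := hpre
  set k : Int → Int := fun v => PySem.List.pyGetD text (3 * v + 2) 0 with hk
  set MAX := pvMaxLetterInText text with hMAX
  have hMAX0 : 0 ≤ MAX := (PySem.List.le_foldl_max text 0).1
  have hMAXub : ∀ c ∈ text, c ≤ MAX := (PySem.List.le_foldl_max text 0).2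
  set N : Nat := (MAX + 1).toNat with hN
  have hNcast : (N : Int) = MAX + 1 := by omega
  have hcov : ∀ v ∈ initial.map (fun i => i - 1), 0 ≤ k v ∧ k v < (N : Int) := by
    intro v hv
    obtain ⟨i, hi, rfl⟩ := List.mem_map.mp hv
    obtain ⟨hi1, hi2, hi3⟩ := hidx i hi
    have hkey : k (i - 1) = PySem.List.pyGetD text (3 * i - 1) 0 := by
      rw [hk]; simp [show 3 * (i - 1) + 2 = 3 * i - 1 from by ring]
    have hmem : k (i - 1) ∈ text := by
      rw [hkey]; exact pv_pyGetD_mem text (3 * i - 1) 0 hi1 hi2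
    exact ⟨hkey ▸ hi3, by rw [hNcast]; exact lt_of_le_of_lt (hMAXub _ hmem) (by omega)⟩
  simp only [pvSortByFirstLetter]
  rw [PySem.List.foldl_pyRange_zero_pyGetD' initial 0
    (fun bs a => pvBucketAppend bs (PySem.List.pyGetD text (3 * a - 1) 0) (a - 1))
    (List.replicate (pvMaxLetterInText text + 1).toNat [])]
  have hidx3 : ∀ a : Int, 3 * a - 1 = 3 * (a - 1) + 2 := fun a => by ring
  simp only [hidx3]
  simp only [show ∀ a : Int, PySem.List.pyGetD text (3 * (a - 1) + 2) 0 = k (a - 1) from fun a => rfl]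
  rw [show (initial.foldl
      (fun bs a => pvBucketAppend bs (k (a - 1)) (a - 1))
      (List.replicate (pvMaxLetterInText text + 1).toNat []))
    = ((initial.map (fun i => i - 1)).foldl (fun bs v => pvBucketAppend bs (k v) v)
      (List.replicate (pvMaxLetterInText text + 1).toNat []))
    from (List.foldl_map (f := fun i : Int => i - 1)
      (g := fun bs v => pvBucketAppend bs (k v) v)).symm]
  rw [pv_bucket_fold k _ _ (by simpa [← hMAX, ← hN] using hcov)]
  rw [PySem.List.foldl_append_eq_flatten, ← List.flatMap_def]
  rw [pv_sorted_eq_buckets k (PySem.List.pyRange 0 (MAX + 1))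
    (PySem.List.pairwise_lt_pyRange_one 0 (MAX + 1)) _
    (fun x hx => PySem.List.mem_pyRange_one.mpr ⟨(hcov x hx).1, by
      have := (hcov x hx).2; omega⟩)]
  rw [PySem.List.pyRange_one, List.flatMap_map]
  simp only [List.nil_append, List.length_replicate, sub_zero, ← hMAX]
  refine List.flatMap_congr ?_
  intro b hb
  rw [List.getD_replicate [] (List.mem_range.mp hb), List.nil_append, zero_add]

theorem pv_cmp_lt_iff (text : List Int) (s j : Int) :
    pvCompareTriples text s j < 0 ↔ pvKeyGe (pvKey3 text s) (pvKey3 text j) = false := by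
  have hr : PySem.List.pyRange 0 3 = [0, 1, 2] := by decide
  simp only [pvCompareTriples, hr, pvCmpK, pvKeyGe, pvKey3, add_zero]
  split_ifs <;> simp_all <;> omega

theorem pv_findPos_le (text : List Int) (last : Int) (l : List Int) :
    pvFindPos text last l ≤ l.length := by
  induction l with
  | nil => simp [pvFindPos]
  | cons s rest ih => simp only [pvFindPos, List.length_cons]; split_ifs <;> omega

theorem pv_findPos_eq (text : List Int) (last : Int) (l : List Int) :
    pvFindPos text last l
    = (l.findIdx? (fun s => pvKeyGe (pvKey3 text s) (pvKey3 text last))).getD l.length := by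
  induction l with
  | nil => simp [pvFindPos]
  | cons s rest ih =>
    rw [pvFindPos, List.findIdx?_cons]
    by_cases h : pvCompareTriples text s last < 0
    · have hb : pvKeyGe (pvKey3 text s) (pvKey3 text last) = false := (pv_cmp_lt_iff text s last).mp h
      rw [if_pos h, hb, if_neg (by simp)]
      cases hfi : rest.findIdx? (fun s => pvKeyGe (pvKey3 text s) (pvKey3 text last)) <;>
        simp_all
    · have hb : pvKeyGe (pvKey3 text s) (pvKey3 text last) = true := by
        rcases Bool.eq_false_or_eq_true (pvKeyGe (pvKey3 text s) (pvKey3 text last)) with ht | hf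
        · exact ht
        · exact absurd ((pv_cmp_lt_iff text s last).mpr hf) h
      rw [if_neg h, hb, if_pos rfl]
      simp

theorem pv_insert_phase (text sa : List Int) :
    pvAddLastTriple sa text = pvSpliceLast text sa := by
  by_cases hm : PySem.Int.mod (text.length : Int) 3 ≠ 2
  · simp only [pvAddLastTriple, pvSpliceLast, if_pos hm]
  · simp only [pvAddLastTriple, pvSpliceLast, if_neg hm]
    rw [← pv_findPos_eq]
    have hle := pv_findPos_le text ((text.length : Int) - 3) sa
    set pos := pvFindPos text ((text.length : Int) - 3) sa with hpos
    by_cases h0 : pos = 0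
    · simp [h0]
    · by_cases hlen : pos = sa.length
      · have hne : sa.length ≠ 0 := fun h => h0 (hlen.trans h)
        rw [hlen, if_neg hne, if_pos rfl]
        simp
      · rw [if_neg h0, if_neg hlen,
          PySem.List.slice_to sa (by positivity), PySem.List.slice_from sa (by positivity)]
        simp [List.append_assoc]

-- ===== VERDICT (by name: the statement is the Claim_ definition above) =====
theorem counting_sort_T2_py_spec : Claim_equal_counting_sort_T2_py := by
  intro text initial _hdom hpre
  unfold Spec_counting_sort_T2_py counting_sort_T2_py counting_sort_T2_py_alt
  rw [pv_sort_phase text initial hpre, pv_insert_phase]
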